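-- pv_equiv track=rewrite | github.com/ocisse/Neolecta_genome_project | src/misc/CM_conservation_plot.py | consd
-- ===== SOURCE A (Python) =====
-- similar = [['G','A','V','L','I'],
--  ['F','Y','W'],
--  ['C','M'],
--  ['S','T'],
--  ['K','R','H'],
--  ['D','E','N','Q'],
--  ['P']]
--
-- def consd(t1,t2,t3):
-- ##    input: 3 lists of characters in the same alignment column. 3 lists because the species are originally divided in 3 groups.
-- ##    output: True if at more than 70% of the characters belong to the same biochemical group. False otherwise
--
--     l = len(t1)+len(t2)+len(t3)
--     c = [0 for i in range(7)] # 7 biochemical groups (refer to 'similar' above)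
--     all_c = t1
--     all_c.extend(t2)
--     all_c.extend(t3)
--     for char in all_c:
--         for group in range(len(similar)):
--             if char in similar[group]:
--                 c[group] +=1
--                 break
--     return True if max(c)>0.7*l else False
-- ===== SOURCE B (Python) =====
-- similar = [['G','A','V','L','I'],
--  ['F','Y','W'],
--  ['C','M'],
--  ['S','T'],
--  ['K','R','H'],
--  ['D','E','N','Q'],
--  ['P']]
--
-- def consd(t1, t2, t3):
--     # Single counting pass into a frequency table, then aggregate per group
--     # by looking up each group's members.  Mutates t1 exactly like the original.
--     all_c = t1
--     all_c.extend(t2)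
--     all_c.extend(t3)
--     l = len(all_c)
--     counts = {}
--     for ch in all_c:
--         counts[ch] = counts.get(ch, 0) + 1
--     best = max(sum(counts.get(ch, 0) for ch in g) for g in similar)
--     return best > 0.7 * l
-- ===== Notes on version B (the rewrite author's own statement) =====
-- stated objective: idiomatic
-- what changed: A scans every character and, per character, loops over the 7 groups until the first match; B builds a frequency table in one pass and then aggregates per group by looking up each group's distinct members, taking the max of the 7 sums.
import Mathlib
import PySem

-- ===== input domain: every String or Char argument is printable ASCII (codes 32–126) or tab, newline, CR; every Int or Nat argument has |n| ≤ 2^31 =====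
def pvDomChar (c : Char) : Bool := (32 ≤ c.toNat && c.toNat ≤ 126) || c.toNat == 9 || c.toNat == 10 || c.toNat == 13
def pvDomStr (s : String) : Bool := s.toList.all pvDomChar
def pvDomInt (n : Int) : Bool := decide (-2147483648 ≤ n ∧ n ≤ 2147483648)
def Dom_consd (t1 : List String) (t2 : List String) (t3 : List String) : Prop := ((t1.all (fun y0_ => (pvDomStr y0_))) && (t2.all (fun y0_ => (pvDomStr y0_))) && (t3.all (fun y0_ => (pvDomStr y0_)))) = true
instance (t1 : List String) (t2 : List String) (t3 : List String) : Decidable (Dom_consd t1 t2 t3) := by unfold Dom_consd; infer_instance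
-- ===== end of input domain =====

-- ===== PORT A =====
-- B mutates t1 in place exactly like A (all_c = t1; extend); the equivalence proved here is about the return value.
def pvSimilar : List (List String) :=
  [["G","A","V","L","I"], ["F","Y","W"], ["C","M"], ["S","T"], ["K","R","H"], ["D","E","N","Q"], ["P"]]

-- exact model of Python's `m > 0.7*l` on IEEE-754 doubles (round-to-nearest-even) for l ≥ 0:
-- 0.7 is the double 3152519739159347/2^52; the product is rounded to 53 significant bits and the
-- int-vs-float comparison is exact.  Shared float primitive of both ports (PySem has no floats).
def pyGtFloat07 (m : Int) (l : Int) : Bool :=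
  let T : Int := 3152519739159347 * l
  if T = 0 then m > 0
  else
    let e := T.natAbs.size
    if e ≤ 53 then m * 2 ^ 52 > T
    else
      let s := e - 53
      let q := T / (2 ^ s : Int)
      let r := T % (2 ^ s : Int)
      let q' := if 2 * r > 2 ^ s ∨ (2 * r = 2 ^ s ∧ q % 2 = 1) then q + 1 else q
      m * 2 ^ 52 > q' * (2 ^ s : Int)

-- A's inner `for group in range(len(similar)): if char in similar[group]: c[group] += 1; break`,
-- walking the count list and the group list together.
def pvBumpA : List Int → List (List String) → String → List Int
  | [], _, _ => []
  | c, [], _ => c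
  | x :: cs, g :: gs, ch => if g.contains ch then (x + 1) :: cs else x :: pvBumpA cs gs ch

def consd (t1 : List String) (t2 : List String) (t3 : List String) : Bool :=
  let l : Int := (t1.length : Int) + (t2.length : Int) + (t3.length : Int)
  let c : List Int := List.replicate 7 0
  let all_c := t1 ++ t2 ++ t3
  let c := all_c.foldl (fun c ch => pvBumpA c pvSimilar ch) c
  match PySem.List.max? c (fun x => x) with
  | some m => pyGtFloat07 m l
  | none => false

-- ===== PORT B =====
def consd_alt (t1 : List String) (t2 : List String) (t3 : List String) : Bool :=
  let all_c := t1 ++ t2 ++ t3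
  let l : Int := (all_c.length : Int)
  let counts := all_c.foldl (fun d ch => d.insert ch (d.getD ch 0 + 1)) (PySem.Dict.empty : PySem.Dict String Int)
  let sums := pvSimilar.map (fun g => g.foldl (fun s ch => s + counts.getD ch 0) 0)
  match PySem.List.max? sums (fun x => x) with
  | some best => pyGtFloat07 best l
  | none => false

-- ===== PRECONDITION & SPEC =====
def Spec_consd (t1 : List String) (t2 : List String) (t3 : List String) (out : Bool) : Prop := out = consd_alt t1 t2 t3
instance (t1 : List String) (t2 : List String) (t3 : List String) (out : Bool) : Decidable (Spec_consd t1 t2 t3 out) := by unfold Spec_consd; infer_instance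

-- ===== CLAIM (what is proved, stated in full; the proofs are below) =====
def Claim_equal_consd : Prop := ∀ (t1 : List String) (t2 : List String) (t3 : List String), Dom_consd t1 t2 t3 → Spec_consd t1 t2 t3 (consd t1 t2 t3)

-- ===== LEMMAS AND PROOFS =====
theorem pvBump7 (a0 a1 a2 a3 a4 a5 a6 : Int) (ch : String) :
    pvBumpA [a0,a1,a2,a3,a4,a5,a6] pvSimilar ch =
    [a0 + (if (["G","A","V","L","I"]:List String).contains ch then 1 else 0),
     a1 + (if (["F","Y","W"]:List String).contains ch then 1 else 0),
     a2 + (if (["C","M"]:List String).contains ch then 1 else 0),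
     a3 + (if (["S","T"]:List String).contains ch then 1 else 0),
     a4 + (if (["K","R","H"]:List String).contains ch then 1 else 0),
     a5 + (if (["D","E","N","Q"]:List String).contains ch then 1 else 0),
     a6 + (if (["P"]:List String).contains ch then 1 else 0)] := by
  by_cases h0 : (["G","A","V","L","I"]:List String).contains ch
  · simp at h0
    rcases h0 with rfl|rfl|rfl|rfl|rfl <;> simp [pvBumpA, pvSimilar]
  · by_cases h1 : (["F","Y","W"]:List String).contains ch
    · simp at h1; rcases h1 with rfl|rfl|rfl <;> simp [pvBumpA, pvSimilar]
    · by_cases h2 : (["C","M"]:List String).contains ch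
      · simp at h2; rcases h2 with rfl|rfl <;> simp [pvBumpA, pvSimilar]
      · by_cases h3 : (["S","T"]:List String).contains ch
        · simp at h3; rcases h3 with rfl|rfl <;> simp [pvBumpA, pvSimilar]
        · by_cases h4 : (["K","R","H"]:List String).contains ch
          · simp at h4; rcases h4 with rfl|rfl|rfl <;> simp [pvBumpA, pvSimilar]
          · by_cases h5 : (["D","E","N","Q"]:List String).contains ch
            · simp at h5; rcases h5 with rfl|rfl|rfl|rfl <;> simp [pvBumpA, pvSimilar]
            · by_cases h6 : (["P"]:List String).contains ch
              · simp at h6; subst h6; simp [pvBumpA, pvSimilar]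
              · simp at h0 h1 h2 h3 h4 h5 h6
                simp [pvBumpA, pvSimilar, h0, h1, h2, h3, h4, h5, h6]

theorem pvFoldA (xs : List String) :
    xs.foldl (fun c ch => pvBumpA c pvSimilar ch) (List.replicate 7 (0:Int)) =
    [(xs.countP (fun ch => (["G","A","V","L","I"]:List String).contains ch) : Int),
     (xs.countP (fun ch => (["F","Y","W"]:List String).contains ch) : Int),
     (xs.countP (fun ch => (["C","M"]:List String).contains ch) : Int),
     (xs.countP (fun ch => (["S","T"]:List String).contains ch) : Int),
     (xs.countP (fun ch => (["K","R","H"]:List String).contains ch) : Int),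
     (xs.countP (fun ch => (["D","E","N","Q"]:List String).contains ch) : Int),
     (xs.countP (fun ch => (["P"]:List String).contains ch) : Int)] := by
  induction xs using List.reverseRecOn with
  | nil => simp [List.replicate]
  | append_singleton xs ch ih =>
    rw [List.foldl_append, ih, List.foldl_cons, List.foldl_nil, pvBump7]
    simp [List.countP_append, List.countP_cons, List.countP_nil,
      apply_ite (fun n : Nat => (n : Int))]

theorem pvCountP_cons_group (v : String) (g xs : List String) (hv : v ∉ g) :
    xs.countP (fun ch => ((v :: g) : List String).contains ch) =
      xs.count v + xs.countP (fun ch => g.contains ch) := by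
  induction xs with
  | nil => simp
  | cons x xs ih =>
    simp only [List.countP_cons, List.count_cons, ih]
    by_cases hx : x = v
    · subst hx
      simp [hv]
      omega
    · by_cases hg : x ∈ g <;> simp [hx, hg]; omega

theorem pvGroupSum (g xs : List String) (hg : g.Nodup) (a : Int) :
    g.foldl (fun s ch => s + (xs.count ch : Int)) a =
      a + (xs.countP (fun ch => g.contains ch) : Int) := by
  induction g generalizing a with
  | nil => simp
  | cons v g ih =>
    rw [List.nodup_cons] at hg
    rw [List.foldl_cons, ih hg.2, pvCountP_cons_group v g xs hg.1]
    push_cast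
    ring

theorem pvSumsB (xs : List String) :
    pvSimilar.map (fun g => g.foldl (fun s ch =>
        s + (xs.foldl (fun d ch => d.insert ch (d.getD ch 0 + 1))
              (PySem.Dict.empty : PySem.Dict String Int)).getD ch 0) 0)
      = [(xs.countP (fun ch => (["G","A","V","L","I"]:List String).contains ch) : Int),
         (xs.countP (fun ch => (["F","Y","W"]:List String).contains ch) : Int),
         (xs.countP (fun ch => (["C","M"]:List String).contains ch) : Int),
         (xs.countP (fun ch => (["S","T"]:List String).contains ch) : Int),
         (xs.countP (fun ch => (["K","R","H"]:List String).contains ch) : Int),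
         (xs.countP (fun ch => (["D","E","N","Q"]:List String).contains ch) : Int),
         (xs.countP (fun ch => (["P"]:List String).contains ch) : Int)] := by
  simp only [PySem.Dict.foldl_insert_getD_add_one_eq_counter, PySem.Dict.getD_counter,
    pvSimilar, List.map_cons, List.map_nil]
  rw [pvGroupSum ["G","A","V","L","I"] xs (by decide) 0,
      pvGroupSum ["F","Y","W"] xs (by decide) 0,
      pvGroupSum ["C","M"] xs (by decide) 0,
      pvGroupSum ["S","T"] xs (by decide) 0,
      pvGroupSum ["K","R","H"] xs (by decide) 0,
      pvGroupSum ["D","E","N","Q"] xs (by decide) 0,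
      pvGroupSum ["P"] xs (by decide) 0]
  simp

theorem consd_spec : Claim_equal_consd := by
  intro t1 t2 t3 _
  unfold Spec_consd
  have hA := pvFoldA (t1 ++ t2 ++ t3)
  have hB := pvSumsB (t1 ++ t2 ++ t3)
  simp only [consd, consd_alt]
  rw [hA, hB]
  simp [List.length_append, add_assoc]
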